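-- pv_equiv track=rewrite | github.com/aysieelf/Alpha63 | Week_2/2_Git/dict_functions.py | dicts_difference
-- ===== SOURCE A (Python) =====
-- def dicts_difference(first_dict, second_dict):
--     """
--     Returns a new dictionary from keys in the first dictionary that are not present in the second dictionary.
--
--     Parameters:
--         first_dict (dict) - The first dictionary
--         second_dict (dict) - The second dictionary
--
--     Returns:
--         (dict) - The resulting dictionary
--     """
--     diff_dict = {}
--     rev_key = []
--
--     for el in second_dict:
--         rev_key.append(el)
--
--     for el in first_dict:
--         if el in rev_key:
--             continue
--         else:
--             diff_dict[el] = first_dict.get(el)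
--
--     return diff_dict
-- ===== SOURCE B (Python) =====
-- def dicts_difference(first_dict, second_dict):
--     result = dict(first_dict)  # shallow copy; first_dict itself is never mutated
--     for k in second_dict:
--         result.pop(k, None)
--     return result
-- ===== Notes on version B (the rewrite author's own statement) =====
-- stated objective: faster
-- what changed: B is subtractive instead of additive: it copies first_dict and pops each of second_dict's keys from the copy (hashed O(n+m)), instead of building a key LIST of second_dict and constructing a new dict from first_dict behind a linear membership scan (O(n*m)).
import Mathlib
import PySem

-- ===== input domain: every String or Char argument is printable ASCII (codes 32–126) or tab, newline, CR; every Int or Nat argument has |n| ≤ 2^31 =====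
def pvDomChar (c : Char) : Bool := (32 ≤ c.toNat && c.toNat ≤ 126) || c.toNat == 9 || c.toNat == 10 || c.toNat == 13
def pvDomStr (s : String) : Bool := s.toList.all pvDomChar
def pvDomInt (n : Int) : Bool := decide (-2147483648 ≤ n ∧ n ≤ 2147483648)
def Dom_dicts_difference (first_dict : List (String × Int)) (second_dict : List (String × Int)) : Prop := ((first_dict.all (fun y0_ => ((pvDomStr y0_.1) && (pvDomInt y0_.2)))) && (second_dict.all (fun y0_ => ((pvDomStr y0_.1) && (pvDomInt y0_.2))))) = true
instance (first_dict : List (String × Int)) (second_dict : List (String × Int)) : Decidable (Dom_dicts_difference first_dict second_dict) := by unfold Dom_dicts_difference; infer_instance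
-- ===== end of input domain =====

-- B drops second_dict's keys from a copy of first_dict instead of rebuilding a dict from
-- first_dict behind a membership guard over a key list of second_dict (objective: faster — hashed pops replace A's linear scan of a key list per key).

-- ===== PORT A =====
def dicts_difference (first_dict : List (String × Int)) (second_dict : List (String × Int)) : List (String × Int) :=
  -- diff_dict = {}; rev_key = []
  -- for el in second_dict: rev_key.append(el)
  let rev_key : List String := second_dict.foldl (fun acc p => acc ++ [p.1]) []
  -- for el in first_dict: if el in rev_key: continue else: diff_dict[el] = first_dict.get(el)
  -- (el is always a key of first_dict, so .get(el) never returns None; getD 0 is unreachable)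
  (first_dict.foldl
    (fun acc p =>
      if rev_key.contains p.1 then acc
      else PySem.Dict.insert acc p.1 ((PySem.Dict.get? (⟨first_dict⟩ : PySem.Dict String Int) p.1).getD 0))
    (⟨[]⟩ : PySem.Dict String Int)).items

-- ===== PORT B =====
def dicts_difference_alt (first_dict : List (String × Int)) (second_dict : List (String × Int)) : List (String × Int) :=
  -- result = dict(first_dict); for k in second_dict: result.pop(k, None); return result
  (second_dict.foldl
    (fun acc p => PySem.Dict.erase acc p.1)
    (⟨first_dict⟩ : PySem.Dict String Int)).items

-- ===== PRECONDITION & SPEC =====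
-- Pre_ excludes association lists whose first_dict has duplicate keys: such lists do not
-- represent any Python dict (and fed as raw lists, A raises AttributeError on .get).
def Pre_dicts_difference (first_dict : List (String × Int)) (second_dict : List (String × Int)) : Prop :=
  (first_dict.map Prod.fst).Nodup
instance (first_dict : List (String × Int)) (second_dict : List (String × Int)) : Decidable (Pre_dicts_difference first_dict second_dict) := by unfold Pre_dicts_difference; infer_instance
def pvWitness_dicts_difference : (List (String × Int)) × (List (String × Int)) := ([("a", 1), ("b", 2)], [("b", 0), ("z", 9)])

def Spec_dicts_difference (first_dict : List (String × Int)) (second_dict : List (String × Int)) (out : List (String × Int)) : Prop := out = dicts_difference_alt first_dict second_dict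
instance (first_dict : List (String × Int)) (second_dict : List (String × Int)) (out : List (String × Int)) : Decidable (Spec_dicts_difference first_dict second_dict out) := by unfold Spec_dicts_difference; infer_instance

-- ===== CLAIM (what is proved, stated in full; the proofs are below) =====
def Claim_equal_dicts_difference : Prop := ∀ (first_dict : List (String × Int)) (second_dict : List (String × Int)), Dom_dicts_difference first_dict second_dict → Pre_dicts_difference first_dict second_dict → Spec_dicts_difference first_dict second_dict (dicts_difference first_dict second_dict)

-- ===== LEMMAS AND PROOFS =====

-- B's side: successive erasures are one filter by "key not among second_dict's keys".
lemma alt_eq_filter (second_dict : List (String × Int)) (d : List (String × Int)) :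
    (second_dict.foldl (fun acc p => PySem.Dict.erase acc p.1)
      (⟨d⟩ : PySem.Dict String Int)).items
    = d.filter (fun p => !(second_dict.map Prod.fst).contains p.1) := by
  induction second_dict generalizing d with
  | nil => simp
  | cons q rest ih =>
    simp only [List.foldl_cons]
    rw [show PySem.Dict.erase (⟨d⟩ : PySem.Dict String Int) q.1
          = (⟨d.filter (fun p => !(p.1 == q.1))⟩ : PySem.Dict String Int) from rfl]
    rw [ih, List.filter_filter]
    apply List.filter_congr
    intro p _
    simp [Bool.not_or, Bool.and_comm]

-- first_dict.get(el) returns el's value when first_dict's keys are distinct.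
lemma get?_of_mem_nodup (l : List (String × Int)) (hnd : (l.map Prod.fst).Nodup)
    (p : String × Int) (hp : p ∈ l) :
    PySem.Dict.get? (⟨l⟩ : PySem.Dict String Int) p.1 = some p.2 := by
  induction l with
  | nil => cases hp
  | cons q rest ih =>
    simp only [List.map_cons, List.nodup_cons] at hnd
    rcases List.mem_cons.mp hp with hp | hp
    · simp [PySem.Dict.get?, hp]
    · have hne : q.1 ≠ p.1 := by
        intro h; exact hnd.1 (h ▸ List.mem_map_of_mem hp)
      simp only [PySem.Dict.get?, List.find?_cons]
      rw [show (q.1 == p.1) = false from by simp [hne]]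
      exact ih hnd.2 hp

-- A's side: the guarded inserts build exactly the filtered prefix appended to the accumulator.
lemma a_fold_eq_filter (rev_key : List String) (full : List (String × Int))
    (l : List (String × Int)) (d : PySem.Dict String Int)
    (hval : ∀ p ∈ l, (PySem.Dict.get? (⟨full⟩ : PySem.Dict String Int) p.1).getD 0 = p.2)
    (hfresh : ∀ p ∈ l, d.contains p.1 = false)
    (hnd : (l.map Prod.fst).Nodup) :
    (l.foldl
      (fun acc p => if rev_key.contains p.1 then acc
        else PySem.Dict.insert acc p.1 ((PySem.Dict.get? (⟨full⟩ : PySem.Dict String Int) p.1).getD 0)) d).items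
    = d.items ++ l.filter (fun p => !rev_key.contains p.1) := by
  induction l generalizing d with
  | nil => simp
  | cons p rest ih =>
    simp only [List.map_cons, List.nodup_cons] at hnd
    simp only [List.foldl_cons, List.filter_cons]
    by_cases hc : rev_key.contains p.1
    · simp only [hc, if_true, Bool.not_true]
      exact ih d (fun q hq => hval q (List.mem_cons_of_mem _ hq))
        (fun q hq => hfresh q (List.mem_cons_of_mem _ hq)) hnd.2
    · have hc' : p.1 ∉ rev_key := by simpa using hc
      have hd : d.contains p.1 = false := hfresh p (List.mem_cons_self ..)
      have hstep : (if rev_key.contains p.1 = true then d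
            else PySem.Dict.insert d p.1 ((PySem.Dict.get? (⟨full⟩ : PySem.Dict String Int) p.1).getD 0))
          = (⟨d.items ++ [(p.1, (PySem.Dict.get? (⟨full⟩ : PySem.Dict String Int) p.1).getD 0)]⟩ : PySem.Dict String Int) := by
        simp [hc', PySem.Dict.insert, hd]
      rw [hstep]
      rw [ih ⟨d.items ++ [(p.1, (PySem.Dict.get? (⟨full⟩ : PySem.Dict String Int) p.1).getD 0)]⟩
        (fun q hq => hval q (List.mem_cons_of_mem _ hq))
        (by
          intro q hq
          have hne : p.1 ≠ q.1 := by
            intro h; exact hnd.1 (h ▸ List.mem_map_of_mem hq)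
          have h1 := hfresh q (List.mem_cons_of_mem _ hq)
          simp only [PySem.Dict.contains] at h1 ⊢
          simp [List.any_append, h1, hne])
        hnd.2]
      have hv := hval p (List.mem_cons_self ..)
      simp [hc', hv, List.append_assoc]

-- ===== VERDICT (by name: the statement is the Claim_ definition above) =====
theorem dicts_difference_spec : Claim_equal_dicts_difference := by
  intro first_dict second_dict _ hpre
  unfold Spec_dicts_difference dicts_difference dicts_difference_alt
  rw [alt_eq_filter]
  rw [PySem.List.foldl_append_singleton_eq_map]
  simp only [List.nil_append]
  exact (a_fold_eq_filter (second_dict.map Prod.fst) first_dict first_dict ⟨[]⟩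
      (fun p hp => by rw [get?_of_mem_nodup first_dict hpre p hp]; rfl)
      (fun p _ => by simp [PySem.Dict.contains])
      hpre).trans (by simp)
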